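-- pv_equiv track=rewrite | github.com/pypi-data/pypi-mirror-390 | packages/revenium-mcp/revenium_mcp-0.2.1-py3-none-any.whl/revenium_mcp_server/tools_decomposed/log_formatters.py | _generate_diagnostic_insights
-- ===== SOURCE A (Python) =====
-- from typing import Any, Dict, List, Optional, Union
--
-- def _generate_diagnostic_insights(
--
--     log_entries: List[Dict[str, Any]],
--     operation_counts: Dict[str, int],
--     status_counts: Dict[str, int],
--     total_elements: int = 0,
--     total_pages: int = 0,
-- ) -> List[str]:
--     """Generate diagnostic insights based on log patterns."""
--     insights = []
--
--     # Check for failures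
--     failure_count = status_counts.get("FAILURE", 0)
--     if failure_count > 0:
--         insights.append(f"Found {failure_count} failed operations requiring investigation")
--
--     # Check for AI metric processing
--     ai_processing = operation_counts.get("AI_METRIC_PROCESSING", 0)
--     if ai_processing > 0:
--         ai_info_count = sum(
--             1
--             for entry in log_entries
--             if entry.get("operation") == "AI_METRIC_PROCESSING"
--             and entry.get("status") == "INFO"
--         )
--         if ai_info_count > 0:
--             insights.append(
--                 f"{ai_info_count} AI_METRIC_PROCESSING entries with INFO status (new products/organizations created)"
--             )
--
--     # Check for large datasets - USE ACTUAL TOTAL FROM API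
--     if total_elements > 100:
--         if total_pages > 1:
--             insights.append(
--                 f"Large dataset available: {total_elements:,} total entries across {total_pages} pages"
--             )
--         else:
--             insights.append(f"Large dataset available: {total_elements:,} total entries")
--
--     # Check for email dispatch issues
--     email_failures = sum(
--         1
--         for entry in log_entries
--         if "EMAIL_DISPATCH" in entry.get("operation", "") and entry.get("status") == "FAILURE"
--     )
--     if email_failures > 0:
--         insights.append(f"Found {email_failures} email dispatch failures")
--
--     return insights
-- ===== SOURCE B (Python) =====
-- def _generate_diagnostic_insights(
--     log_entries,
--     operation_counts,
--     status_counts,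
--     total_elements=0,
--     total_pages=0,
-- ):
--     """Generate diagnostic insights: aggregate the log once into a histogram of
--     (operation, status) pairs, then answer every count query from the histogram."""
--     pair_counts = {}
--     for entry in log_entries:
--         key = (entry.get("operation"), entry.get("status"))
--         pair_counts[key] = pair_counts.get(key, 0) + 1
--
--     ai_info_count = pair_counts.get(("AI_METRIC_PROCESSING", "INFO"), 0)
--     email_failures = sum(
--         v
--         for (op, st), v in pair_counts.items()
--         if op is not None and "EMAIL_DISPATCH" in op and st == "FAILURE"
--     )
--
--     failure_count = status_counts.get("FAILURE", 0)
--
--     large = None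
--     if total_elements > 100:
--         if total_pages > 1:
--             large = f"Large dataset available: {total_elements:,} total entries across {total_pages} pages"
--         else:
--             large = f"Large dataset available: {total_elements:,} total entries"
--
--     sections = [
--         f"Found {failure_count} failed operations requiring investigation"
--         if failure_count > 0 else None,
--         f"{ai_info_count} AI_METRIC_PROCESSING entries with INFO status (new products/organizations created)"
--         if operation_counts.get("AI_METRIC_PROCESSING", 0) > 0 and ai_info_count > 0 else None,
--         large,
--         f"Found {email_failures} email dispatch failures"
--         if email_failures > 0 else None,
--     ]
--     return [s for s in sections if s is not None]
-- ===== Notes on version B (the rewrite author's own statement) =====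
-- stated objective: alternative
-- what changed: B aggregates the log once into a histogram keyed by (operation, status) pairs and answers both statistics as queries on the histogram (a direct lookup for the AI count, a sum over histogram items for email failures), assembling the result from optional sections, instead of A's per-statistic sum(...) scans over the raw entries with sequential appends.
import Mathlib
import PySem

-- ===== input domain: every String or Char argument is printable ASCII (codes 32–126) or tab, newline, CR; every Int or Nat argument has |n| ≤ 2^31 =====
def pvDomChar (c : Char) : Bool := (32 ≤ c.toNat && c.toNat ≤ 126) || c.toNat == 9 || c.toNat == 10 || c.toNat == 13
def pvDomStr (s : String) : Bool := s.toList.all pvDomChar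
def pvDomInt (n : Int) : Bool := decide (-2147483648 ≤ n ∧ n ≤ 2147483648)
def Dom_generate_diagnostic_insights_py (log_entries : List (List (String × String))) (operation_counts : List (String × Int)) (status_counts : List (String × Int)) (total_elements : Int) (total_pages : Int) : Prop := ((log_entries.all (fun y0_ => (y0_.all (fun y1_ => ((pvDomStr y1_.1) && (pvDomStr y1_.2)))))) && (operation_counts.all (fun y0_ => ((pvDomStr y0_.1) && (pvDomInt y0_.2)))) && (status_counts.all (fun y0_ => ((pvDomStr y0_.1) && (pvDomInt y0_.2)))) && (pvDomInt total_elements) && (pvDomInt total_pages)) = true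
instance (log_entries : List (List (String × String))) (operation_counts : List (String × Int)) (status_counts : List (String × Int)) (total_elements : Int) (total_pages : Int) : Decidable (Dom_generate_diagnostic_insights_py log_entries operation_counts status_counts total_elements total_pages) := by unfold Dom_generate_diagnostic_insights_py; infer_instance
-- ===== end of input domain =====

-- B aggregates the log once into a histogram of (operation, status) pairs and answers both
-- count statistics as histogram queries; same return value, different algorithm (objective: alternative).

-- ===== PORT A =====
-- helper for Python's f"{n:,}" thousands-separator formatting (shared f-string semantics)
def pvCommaGo : List Char → Nat → List Char
  | [], _ => []
  | c :: cs, 0 => ',' :: c :: pvCommaGo cs 2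
  | c :: cs, Nat.succ n => c :: pvCommaGo cs n

def pvCommaFmt (n : Int) : String :=
  match PySem.Int.toChars n with
  | '-' :: ds => String.ofList ('-' :: (pvCommaGo ds.reverse 3).reverse)
  | ds => String.ofList ((pvCommaGo ds.reverse 3).reverse)

def generate_diagnostic_insights_py (log_entries : List (List (String × String))) (operation_counts : List (String × Int)) (status_counts : List (String × Int)) (total_elements : Int) (total_pages : Int) : List String :=
  let insights : List String := []
  let failure_count := PySem.Dict.getD (PySem.Dict.mk status_counts) "FAILURE" 0
  let insights :=
    if failure_count > 0 then
      insights ++ ["Found " ++ PySem.Int.toStr failure_count ++ " failed operations requiring investigation"]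
    else insights
  let ai_processing := PySem.Dict.getD (PySem.Dict.mk operation_counts) "AI_METRIC_PROCESSING" 0
  let insights :=
    if ai_processing > 0 then
      let ai_info_count : Int := log_entries.foldl (fun acc entry =>
        if PySem.Dict.get? (PySem.Dict.mk entry) "operation" == some "AI_METRIC_PROCESSING"
            && PySem.Dict.get? (PySem.Dict.mk entry) "status" == some "INFO"
        then acc + 1 else acc) 0
      if ai_info_count > 0 then
        insights ++ [PySem.Int.toStr ai_info_count ++ " AI_METRIC_PROCESSING entries with INFO status (new products/organizations created)"]
      else insights
    else insights
  let insights :=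
    if total_elements > 100 then
      if total_pages > 1 then
        insights ++ ["Large dataset available: " ++ pvCommaFmt total_elements ++ " total entries across " ++ PySem.Int.toStr total_pages ++ " pages"]
      else
        insights ++ ["Large dataset available: " ++ pvCommaFmt total_elements ++ " total entries"]
    else insights
  let email_failures : Int := log_entries.foldl (fun acc entry =>
    if PySem.Str.isIn "EMAIL_DISPATCH" (PySem.Dict.getD (PySem.Dict.mk entry) "operation" "")
        && PySem.Dict.get? (PySem.Dict.mk entry) "status" == some "FAILURE"
    then acc + 1 else acc) 0
  if email_failures > 0 then
    insights ++ ["Found " ++ PySem.Int.toStr email_failures ++ " email dispatch failures"]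
  else insights

-- ===== PORT B =====
-- key = (entry.get("operation"), entry.get("status"))
def pvLogKey (entry : List (String × String)) : Option String × Option String :=
  (PySem.Dict.get? (PySem.Dict.mk entry) "operation", PySem.Dict.get? (PySem.Dict.mk entry) "status")

-- the generator's filter: op is not None and "EMAIL_DISPATCH" in op and st == "FAILURE"
def pvEmailKey (k : Option String × Option String) : Bool :=
  (match k.1 with
   | some o => PySem.Str.isIn "EMAIL_DISPATCH" o
   | none => false) && k.2 == some "FAILURE"

def generate_diagnostic_insights_py_alt (log_entries : List (List (String × String))) (operation_counts : List (String × Int)) (status_counts : List (String × Int)) (total_elements : Int) (total_pages : Int) : List String :=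
  -- histogram of (operation, status) pairs: pair_counts[key] = pair_counts.get(key, 0) + 1
  let pair_counts : PySem.Dict (Option String × Option String) Int :=
    log_entries.foldl (fun d entry =>
      d.insert (pvLogKey entry) (d.getD (pvLogKey entry) 0 + 1)) PySem.Dict.empty
  let ai_info_count : Int := pair_counts.getD (some "AI_METRIC_PROCESSING", some "INFO") 0
  let email_failures : Int := pair_counts.items.foldl
      (fun acc kv => if pvEmailKey kv.1 then acc + kv.2 else acc) 0
  let failure_count := PySem.Dict.getD (PySem.Dict.mk status_counts) "FAILURE" 0
  let large : Option String :=
    if total_elements > 100 then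
      some (if total_pages > 1 then
          "Large dataset available: " ++ pvCommaFmt total_elements ++ " total entries across " ++ PySem.Int.toStr total_pages ++ " pages"
        else
          "Large dataset available: " ++ pvCommaFmt total_elements ++ " total entries")
    else none
  let sections : List (Option String) :=
    [ if failure_count > 0 then
        some ("Found " ++ PySem.Int.toStr failure_count ++ " failed operations requiring investigation")
      else none,
      if PySem.Dict.getD (PySem.Dict.mk operation_counts) "AI_METRIC_PROCESSING" 0 > 0 ∧ ai_info_count > 0 then
        some (PySem.Int.toStr ai_info_count ++ " AI_METRIC_PROCESSING entries with INFO status (new products/organizations created)")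
      else none,
      large,
      if email_failures > 0 then
        some ("Found " ++ PySem.Int.toStr email_failures ++ " email dispatch failures")
      else none ]
  sections.filterMap id

-- ===== PRECONDITION & SPEC =====
def Spec_generate_diagnostic_insights_py (log_entries : List (List (String × String))) (operation_counts : List (String × Int)) (status_counts : List (String × Int)) (total_elements : Int) (total_pages : Int) (out : List String) : Prop := out = generate_diagnostic_insights_py_alt log_entries operation_counts status_counts total_elements total_pages
instance (log_entries : List (List (String × String))) (operation_counts : List (String × Int)) (status_counts : List (String × Int)) (total_elements : Int) (total_pages : Int) (out : List String) : Decidable (Spec_generate_diagnostic_insights_py log_entries operation_counts status_counts total_elements total_pages out) := by unfold Spec_generate_diagnostic_insights_py; infer_instance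

-- ===== CLAIM (what is proved, stated in full; the proofs are below) =====
def Claim_equal_generate_diagnostic_insights_py : Prop := ∀ (log_entries : List (List (String × String))) (operation_counts : List (String × Int)) (status_counts : List (String × Int)) (total_elements : Int) (total_pages : Int), Dom_generate_diagnostic_insights_py log_entries operation_counts status_counts total_elements total_pages → Spec_generate_diagnostic_insights_py log_entries operation_counts status_counts total_elements total_pages (generate_diagnostic_insights_py log_entries operation_counts status_counts total_elements total_pages)

-- ===== LEMMAS AND PROOFS =====

-- a "count the elements satisfying q" fold, with arbitrary start
theorem pvCountFold {α : Type} (q : α → Bool) (l : List α) (a : Int) :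
    l.foldl (fun acc x => if q x then acc + 1 else acc) a = a + (l.countP q : Int) := by
  induction l generalizing a with
  | nil => simp
  | cons x l ih =>
    simp only [List.foldl_cons, List.countP_cons, ih]
    by_cases h : q x = true <;> simp [h] <;> push_cast <;> ring

-- a "sum w over the elements satisfying q" fold shifts its start additively
theorem pvFoldShift {α : Type} (q : α → Bool) (w : α → Int) (l : List α) (a : Int) :
    l.foldl (fun acc x => if q x then acc + w x else acc) a
      = a + l.foldl (fun acc x => if q x then acc + w x else acc) 0 := by
  induction l generalizing a with
  | nil => simp
  | cons x l ih =>
    simp only [List.foldl_cons]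
    rw [ih, ih (if q x then 0 + w x else 0)]
    by_cases h : q x = true <;> simp [h] <;> ring

-- countP splits off the occurrences of one value
theorem pvCountSplit {κ : Type} [BEq κ] [LawfulBEq κ] (p : κ → Bool) (a : κ) (xs : List κ) :
    xs.countP p = (if p a then xs.count a else 0) + (xs.filter (fun x => !(x == a))).countP p := by
  induction xs with
  | nil => simp
  | cons x xs ih =>
    by_cases hx : x = a
    · subst hx
      by_cases hp : p x = true <;>
        simp [List.countP_cons, List.count_cons, List.filter_cons, hp, ih] <;> omega
    · have hbe : (x == a) = false := by simp [hx]
      by_cases hp : p x = true <;>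
        simp [List.countP_cons, List.count_cons, List.filter_cons, hbe, hp, ih] <;> omega

-- summing per-key multiplicities over any duplicate-free key list covering xs counts xs by p
theorem pvDistinctSum {κ : Type} [BEq κ] [LawfulBEq κ] (p : κ → Bool) :
    ∀ (l : List κ) (xs : List κ), l.Nodup → (∀ k, k ∈ xs → k ∈ l) →
      l.foldl (fun acc k => if p k then acc + (xs.count k : Int) else acc) 0 = (xs.countP p : Int) := by
  intro l
  induction l with
  | nil =>
    intro xs _ hcov
    have : xs = [] := by
      cases xs with
      | nil => rfl
      | cons y ys => exact absurd (hcov y (by simp)) (by simp)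
    simp [this]
  | cons a l ih =>
    intro xs hnd hcov
    have hal : a ∉ l := (List.nodup_cons.mp hnd).1
    have hndl : l.Nodup := (List.nodup_cons.mp hnd).2
    simp only [List.foldl_cons]
    rw [pvFoldShift]
    have hcongr : l.foldl (fun acc k => if p k then acc + (xs.count k : Int) else acc) 0
        = l.foldl (fun acc k => if p k then acc + ((xs.filter (fun x => !(x == a))).count k : Int) else acc) 0 := by
      apply PySem.List.foldl_congr_mem
      intro acc k hk
      have hka : (k == a) = false := by
        simp only [beq_eq_false_iff_ne]
        intro h; exact hal (h ▸ hk)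
      have : (xs.filter (fun x => !(x == a))).count k = xs.count k := by
        rw [List.count_filter]
        simp [hka]
      rw [this]
    rw [hcongr, ih (xs.filter (fun x => !(x == a))) hndl
        (by intro k hk
            have hkxs := List.mem_of_mem_filter hk
            have hka : k ≠ a := by
              have := List.of_mem_filter hk
              simpa using this
            have := hcov k hkxs
            simpa [hka] using this)]
    rw [pvCountSplit p a xs]
    by_cases hp : p a = true <;> simp [hp] <;> push_cast <;> ring

-- A's AI condition is equality of the entry's key pair with the target
theorem pvAiCond (entry : List (String × String)) :
    (PySem.Dict.get? (PySem.Dict.mk entry) "operation" == some "AI_METRIC_PROCESSING"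
      && PySem.Dict.get? (PySem.Dict.mk entry) "status" == some "INFO")
    = (pvLogKey entry == ((some "AI_METRIC_PROCESSING", some "INFO") : Option String × Option String)) := by
  rfl

-- A's e-mail condition is B's key predicate applied to the entry's key pair
theorem pvEmailCond (entry : List (String × String)) :
    (PySem.Str.isIn "EMAIL_DISPATCH" (PySem.Dict.getD (PySem.Dict.mk entry) "operation" "")
      && PySem.Dict.get? (PySem.Dict.mk entry) "status" == some "FAILURE")
    = pvEmailKey (pvLogKey entry) := by
  have hD : PySem.Dict.getD (PySem.Dict.mk entry) "operation" ""
      = (PySem.Dict.get? (PySem.Dict.mk entry) "operation").getD "" :=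
    PySem.Dict.getD_eq_get?_getD _ _ _
  unfold pvEmailKey pvLogKey
  cases hop : PySem.Dict.get? (PySem.Dict.mk entry) "operation" with
  | none =>
    simp [hD, hop, PySem.Str.isIn]
    intro h
    exact absurd h (by decide)
  | some o => simp [hD, hop]

-- B's histogram is the counter of the entries' key pairs
theorem pvHistEq (log_entries : List (List (String × String))) :
    log_entries.foldl (fun d entry =>
        d.insert (pvLogKey entry) (d.getD (pvLogKey entry) 0 + 1)) PySem.Dict.empty
      = PySem.Dict.counter (log_entries.map pvLogKey) := by
  rw [← PySem.Dict.foldl_insert_getD_add_one_eq_counter, List.foldl_map]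

-- A's AI counting fold equals B's histogram lookup
theorem pvAiEq (log_entries : List (List (String × String))) :
    (log_entries.foldl (fun acc entry =>
        if PySem.Dict.get? (PySem.Dict.mk entry) "operation" == some "AI_METRIC_PROCESSING"
            && PySem.Dict.get? (PySem.Dict.mk entry) "status" == some "INFO"
        then acc + 1 else acc) (0 : Int))
    = (log_entries.foldl (fun d entry =>
        d.insert (pvLogKey entry) (d.getD (pvLogKey entry) 0 + 1)) PySem.Dict.empty).getD
        (some "AI_METRIC_PROCESSING", some "INFO") 0 := by
  rw [pvHistEq, PySem.Dict.getD_counter]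
  have h1 : (log_entries.foldl (fun acc entry =>
        if PySem.Dict.get? (PySem.Dict.mk entry) "operation" == some "AI_METRIC_PROCESSING"
            && PySem.Dict.get? (PySem.Dict.mk entry) "status" == some "INFO"
        then acc + 1 else acc) (0 : Int))
      = (log_entries.countP (fun entry => pvLogKey entry
          == ((some "AI_METRIC_PROCESSING", some "INFO") : Option String × Option String)) : Int) := by
    have := pvCountFold (fun entry => pvLogKey entry
        == ((some "AI_METRIC_PROCESSING", some "INFO") : Option String × Option String)) log_entries 0
    simpa [pvAiCond] using this
  rw [h1]
  congr 1
  rw [List.count_eq_countP, List.countP_map]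
  rfl

-- A's e-mail counting fold equals B's sum over the histogram's items
theorem pvEmailEq (log_entries : List (List (String × String))) :
    (log_entries.foldl (fun acc entry =>
        if PySem.Str.isIn "EMAIL_DISPATCH" (PySem.Dict.getD (PySem.Dict.mk entry) "operation" "")
            && PySem.Dict.get? (PySem.Dict.mk entry) "status" == some "FAILURE"
        then acc + 1 else acc) (0 : Int))
    = (log_entries.foldl (fun d entry =>
        d.insert (pvLogKey entry) (d.getD (pvLogKey entry) 0 + 1)) PySem.Dict.empty).items.foldl
        (fun acc kv => if pvEmailKey kv.1 then acc + kv.2 else acc) 0 := by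
  rw [pvHistEq, PySem.Dict.items_counter, List.foldl_map]
  rw [pvDistinctSum pvEmailKey (PySem.Set.ofList (log_entries.map pvLogKey)) (log_entries.map pvLogKey)
      (PySem.Set.nodup_ofList _) (fun k hk => (PySem.Set.mem_ofList _ _).mpr hk)]
  rw [List.countP_map]
  have h2 : ((List.countP (pvEmailKey ∘ pvLogKey) log_entries : Nat) : Int)
      = List.foldl (fun acc entry => if pvEmailKey (pvLogKey entry) then acc + 1 else acc) (0 : Int) log_entries := by
    have := pvCountFold (fun entry => pvEmailKey (pvLogKey entry)) log_entries 0
    simpa [Function.comp] using this.symm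
  rw [h2]
  apply PySem.List.foldl_congr_mem
  intro acc entry _
  rw [pvEmailCond]

-- A's sequential appends equal B's optional-sections assembly, for arbitrary scalars.
theorem pvAssemble (fc ap ai te tp ef : Int) (sF sA sL1 sL2 sE : String) :
    (let i0 : List String := [];
     let i1 := if fc > 0 then i0 ++ [sF] else i0;
     let i2 := if ap > 0 then (if ai > 0 then i1 ++ [sA] else i1) else i1;
     let i3 := if te > 100 then (if tp > 1 then i2 ++ [sL1] else i2 ++ [sL2]) else i2;
     if ef > 0 then i3 ++ [sE] else i3)
    = List.filterMap id
        [ if fc > 0 then some sF else none,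
          if ap > 0 ∧ ai > 0 then some sA else none,
          if te > 100 then some (if tp > 1 then sL1 else sL2) else none,
          if ef > 0 then some sE else none ] := by
  simp only []
  split_ifs <;> simp_all [List.filterMap]

-- ===== VERDICT (by name: the statement is the Claim_ definition above) =====
theorem generate_diagnostic_insights_py_spec : Claim_equal_generate_diagnostic_insights_py := by
  intro log_entries operation_counts status_counts total_elements total_pages _
  unfold Spec_generate_diagnostic_insights_py
  unfold generate_diagnostic_insights_py generate_diagnostic_insights_py_alt
  rw [pvAiEq, pvEmailEq]
  exact pvAssemble _ _ _ _ _ _ _ _ _ _ _
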